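-- pv_equiv track=rewrite | github.com/DavideWiest/algo_problems | combs.py | makeSortedPairs
-- ===== SOURCE A (Python) =====
-- def makeSortedPairs(l: list) -> set:
--     combs = set()
--     for i, item in enumerate(l):
--         combs.update({
--             (item if item <= item2 else item2,
--             item2 if item2 >= item else item) for item2 in l[i:]
--         })
--     return combs
-- ===== SOURCE B (Python) =====
-- def makeSortedPairs(l: list) -> set:
--     # one linear pass extracts the distinct values in first-occurrence order
--     seen = set()
--     vals = []
--     for x in l:
--         if x not in seen:
--             seen.add(x)
--             vals.append(x)
--
--     # worklist peel over the distinct values: repeatedly split off the head and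
--     # emit its row of pairs; each output pair is built exactly once, so the
--     # final set() never has to deduplicate pairs
--     pairs = []
--     rest = vals
--     while rest:
--         a, rest = rest[0], rest[1:]
--         pairs.append((a, a))
--         pairs.extend((a, b) if a < b else (b, a) for b in rest)
--     return set(pairs)
-- ===== Notes on version B (the rewrite author's own statement) =====
-- stated objective: alternative
-- what changed: A enumerates all O(n^2) index pairs of l, normalizes each with a min/max conditional and relies on incremental set-union to deduplicate the many repeated pairs; B never enumerates index pairs of l at all: one linear membership-set pass extracts the distinct values, then a worklist loop repeatedly splits off the head value and emits its row of pairs into a flat list, so every output pair is built exactly once and the final set() does no deduplication, O(n + m^2) with m distinct values.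
import Mathlib
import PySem

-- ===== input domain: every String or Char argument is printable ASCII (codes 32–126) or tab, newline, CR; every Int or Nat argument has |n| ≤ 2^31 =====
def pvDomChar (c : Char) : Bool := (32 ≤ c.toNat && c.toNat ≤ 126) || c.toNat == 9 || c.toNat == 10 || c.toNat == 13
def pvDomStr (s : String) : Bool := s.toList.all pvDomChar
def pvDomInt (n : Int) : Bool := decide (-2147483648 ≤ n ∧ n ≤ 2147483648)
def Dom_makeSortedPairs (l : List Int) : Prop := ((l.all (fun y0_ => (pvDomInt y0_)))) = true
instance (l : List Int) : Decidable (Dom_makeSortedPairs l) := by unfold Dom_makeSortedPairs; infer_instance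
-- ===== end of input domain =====

-- B replaces A's index-pair enumeration (with per-pair min/max and set-union dedup) by a linear
-- distinct-value pass followed by a worklist peel that emits each pair exactly once (objective: alternative).


-- ===== PORT A =====
-- 'combs = set(); for i, item in enumerate(l): combs.update({(item if item<=item2 else item2,
--  item2 if item2>=item else item) for item2 in l[i:]}); return combs'  (pairs ported as 2-element lists)
def makeSortedPairs (l : List Int) : List (List Int) :=
  (PySem.List.enumerate l 0).foldl
    (fun combs p =>
      PySem.Set.update combs
        (PySem.Set.ofList ((PySem.List.slice l (some p.1) none).map
          (fun item2 => [if p.2 ≤ item2 then p.2 else item2,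
                         if item2 ≥ p.2 then item2 else p.2]))))
    PySem.Set.empty

-- ===== PORT B =====
-- 'seen = set(); vals = []; for x in l: if x not in seen: seen.add(x); vals.append(x)'
def distinctPass (l : List Int) : PySem.Set Int × List Int :=
  l.foldl
    (fun st x =>
      if !(PySem.Set.contains st.1 x) then (PySem.Set.add st.1 x, st.2 ++ [x]) else st)
    (PySem.Set.empty, [])

-- 'pairs = []; rest = vals; while rest: a, rest = rest[0], rest[1:];
--  pairs.append((a,a)); pairs.extend((a,b) if a<b else (b,a) for b in rest)'
def peelLoop : List Int → List (List Int) → List (List Int)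
  | [], pairs => pairs
  | a :: rest, pairs =>
      peelLoop rest ((pairs ++ [[a, a]]) ++ rest.map (fun b => if a < b then [a, b] else [b, a]))

-- 'return set(pairs)'
def makeSortedPairs_alt (l : List Int) : List (List Int) :=
  PySem.Set.ofList (peelLoop (distinctPass l).2 [])

-- ===== PRECONDITION & SPEC =====
def Spec_makeSortedPairs (l : List Int) (out : List (List Int)) : Prop := out = makeSortedPairs_alt l
instance (l : List Int) (out : List (List Int)) : Decidable (Spec_makeSortedPairs l out) := by unfold Spec_makeSortedPairs; infer_instance

-- ===== CLAIM (what is proved, stated in full; the proofs are below) =====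
def Claim_equal_makeSortedPairs : Prop := ∀ (l : List Int), Dom_makeSortedPairs l → Spec_makeSortedPairs l (makeSortedPairs l)

-- ===== LEMMAS AND PROOFS =====

-- the sorted pair (min a b, max a b), exactly A's conditional
def spair (a b : Int) : List Int := if a ≤ b then [a, b] else [b, a]

-- all sorted pairs over index pairs i ≤ j, in A's scan order
def pairsAll : List Int → List (List Int)
  | [] => []
  | a :: t => (a :: t).map (spair a) ++ pairsAll t

theorem spair_comm (a b : Int) : spair a b = spair b a := by
  unfold spair
  split_ifs <;> (try rfl) <;> simp <;> omega

theorem spair_eq_A (a : Int) :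
    (fun item2 => [if a ≤ item2 then a else item2, if item2 ≥ a then item2 else a]) = spair a := by
  funext b; unfold spair
  split_ifs <;> rfl

theorem spair_eq_B (a : Int) :
    (fun b => if a < b then [a, b] else [b, a]) = spair a := by
  funext b; unfold spair
  split_ifs with h1 h2 h2
  · rfl
  · omega
  · have : a = b := by omega
    simp [this]
  · rfl

theorem update_ofList (s : PySem.Set (List Int)) (xs : List (List Int)) :
    s.update (PySem.Set.ofList xs) = s.update xs := by
  rw [PySem.Set.update_eq_append_filter, PySem.Set.update_eq_append_filter,
    PySem.Set.ofList_ofList]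

theorem update_of_forall_mem {s : PySem.Set (List Int)} {xs : List (List Int)}
    (h : ∀ x ∈ xs, x ∈ s) : s.update xs = s := by
  induction xs generalizing s with
  | nil => rfl
  | cons x xs ih =>
    rw [PySem.Set.update_cons, PySem.Set.add_of_mem (h x (by simp))]
    exact ih fun y hy => h y (by simp [hy])

theorem update_map_filter (p : Int → Bool) (f : Int → List Int)
    (xs : List Int) (s : PySem.Set (List Int))
    (h : ∀ x ∈ xs, p x = false → f x ∈ s) :
    s.update (xs.map f) = s.update ((xs.filter p).map f) := by
  induction xs generalizing s with
  | nil => rfl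
  | cons x xs ih =>
    by_cases hx : p x
    · rw [List.map_cons, List.filter_cons_of_pos hx, List.map_cons,
        PySem.Set.update_cons, PySem.Set.update_cons]
      exact ih _ fun y hy hpy =>
        (PySem.Set.mem_add _ _ _).mpr (Or.inl (h y (by simp [hy]) hpy))
    · have hmem : f x ∈ s := h x (by simp) (by simpa using hx)
      rw [List.map_cons, List.filter_cons_of_neg hx, PySem.Set.update_cons,
        PySem.Set.add_of_mem hmem]
      exact ih _ fun y hy hpy => h y (by simp [hy]) hpy

theorem ofList_filter (a : Int) : ∀ (t : List Int),
    List.filter (fun y => !(y == a)) (PySem.Set.ofList t)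
      = PySem.Set.ofList (t.filter (fun x => x != a))
  | [] => rfl
  | b :: t => by
    rw [PySem.Set.ofList_cons, PySem.Set.discard]
    by_cases hb : b = a
    · subst hb
      rw [List.filter_cons_of_neg (by simp), List.filter_filter]
      rw [show List.filter (fun x => x != b) (b :: t) = List.filter (fun x => x != b) t by simp]
      rw [← ofList_filter b t]
      exact List.filter_congr (fun x _ => by cases h : (x == b) <;> simp)
    · rw [List.filter_cons_of_pos (by simp [hb]),
        show List.filter (fun x => x != a) (b :: t) = b :: List.filter (fun x => x != a) t by
          simp [hb],
        PySem.Set.ofList_cons, PySem.Set.discard, ← ofList_filter a t, List.filter_filter,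
        List.filter_filter]
      congr 1
      exact List.filter_congr (fun x _ => Bool.and_comm _ _)

theorem dedup_cons (a : Int) (t : List Int) :
    PySem.List.dedup (a :: t) = a :: PySem.List.dedup (t.filter (fun x => x != a)) := by
  simp only [PySem.List.dedup_eq_ofList, PySem.Set.ofList_cons, PySem.Set.discard]
  congr 1
  exact ofList_filter a t

theorem update_map_dedup (f : Int → List Int) :
    ∀ (xs : List Int) (s : PySem.Set (List Int)),
      s.update (xs.map f) = s.update ((PySem.List.dedup xs).map f)
  | [], _ => rfl
  | x :: xs, s => by
    rw [dedup_cons]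
    rw [List.map_cons, List.map_cons, PySem.Set.update_cons, PySem.Set.update_cons]
    rw [update_map_filter (fun y => y != x) f xs (s.add (f x))
      (fun y _ hy => by
        have : y = x := by simpa using hy
        subst this; exact (PySem.Set.mem_add _ _ _).mpr (Or.inr rfl))]
    exact update_map_dedup f (xs.filter (fun y => y != x)) (s.add (f x))
  termination_by xs => xs.length
  decreasing_by simpa using Nat.lt_succ_of_le (List.length_filter_le _ _)

theorem pairs_elim (a : Int) :
    ∀ (t : List Int) (s : PySem.Set (List Int)),
      (∀ x ∈ t, spair a x ∈ s) →
      s.update (pairsAll t) = s.update (pairsAll (t.filter (fun x => x != a)))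
  | [], _, _ => rfl
  | b :: t, s, h => by
    by_cases hb : b = a
    · rw [hb] at h ⊢
      have habs : s.update ((a :: t).map (spair a)) = s :=
        update_of_forall_mem (by
          intro x hx
          obtain ⟨z, hz, rfl⟩ := List.mem_map.mp hx
          exact h z hz)
      have hfil : List.filter (fun x => x != a) (a :: t) = List.filter (fun x => x != a) t :=
        List.filter_cons_of_neg (by simp)
      rw [show pairsAll (a :: t) = (a :: t).map (spair a) ++ pairsAll t from rfl,
        PySem.Set.update_append, habs, hfil]
      exact pairs_elim a t s fun x hx => h x (by simp [hx])
    · have hfil : List.filter (fun x => x != a) (b :: t)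
          = b :: List.filter (fun x => x != a) t := List.filter_cons_of_pos (by simp [hb])
      have hmf : (s.add (spair b b)).update (t.map (spair b))
          = (s.add (spair b b)).update ((t.filter (fun y => y != a)).map (spair b)) :=
        update_map_filter (fun y => y != a) (spair b) t (s.add (spair b b))
          (fun y _ hy => by
            have : y = a := by simpa using hy
            subst this
            exact (PySem.Set.mem_add _ _ _).mpr
              (Or.inl (by rw [spair_comm]; exact h b (by simp))))
      calc s.update (pairsAll (b :: t))
          = ((s.add (spair b b)).update (t.map (spair b))).update (pairsAll t) := by
            rw [show pairsAll (b :: t) = (b :: t).map (spair b) ++ pairsAll t from rfl,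
              PySem.Set.update_append, List.map_cons, PySem.Set.update_cons]
        _ = ((s.add (spair b b)).update ((t.filter (fun y => y != a)).map (spair b))).update
              (pairsAll t) := by rw [hmf]
        _ = ((s.add (spair b b)).update ((t.filter (fun y => y != a)).map (spair b))).update
              (pairsAll (t.filter (fun x => x != a))) := by
            refine pairs_elim a t _ fun x hx => ?_
            exact (PySem.Set.mem_update _ _ _).mpr (Or.inl ((PySem.Set.mem_add _ _ _).mpr
              (Or.inl (h x (by simp [hx])))))
        _ = s.update (pairsAll (List.filter (fun x => x != a) (b :: t))) := by
            rw [hfil,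
              show pairsAll (b :: List.filter (fun x => x != a) t)
                = (b :: List.filter (fun x => x != a) t).map (spair b)
                  ++ pairsAll (List.filter (fun x => x != a) t) from rfl,
              PySem.Set.update_append, List.map_cons, PySem.Set.update_cons]

theorem pairs_dedup :
    ∀ (l : List Int) (s : PySem.Set (List Int)),
      s.update (pairsAll l) = s.update (pairsAll (PySem.List.dedup l))
  | [], _ => rfl
  | a :: t, s => by
    have hmf : (s.add (spair a a)).update (t.map (spair a))
        = (s.add (spair a a)).update ((PySem.List.dedup
            (t.filter (fun y => y != a))).map (spair a)) := by
      rw [update_map_filter (fun y => y != a) (spair a) t (s.add (spair a a))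
          (fun y _ hy => by
            have : y = a := by simpa using hy
            subst this; exact (PySem.Set.mem_add _ _ _).mpr (Or.inr rfl)),
        update_map_dedup]
    calc s.update (pairsAll (a :: t))
        = ((s.add (spair a a)).update (t.map (spair a))).update (pairsAll t) := by
          rw [show pairsAll (a :: t) = (a :: t).map (spair a) ++ pairsAll t from rfl,
            PySem.Set.update_append, List.map_cons, PySem.Set.update_cons]
      _ = ((s.add (spair a a)).update ((PySem.List.dedup
            (t.filter (fun y => y != a))).map (spair a))).update (pairsAll t) := by rw [hmf]
      _ = ((s.add (spair a a)).update ((PySem.List.dedup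
            (t.filter (fun y => y != a))).map (spair a))).update
            (pairsAll (t.filter (fun x => x != a))) := by
          refine pairs_elim a t _ fun x hx => ?_
          by_cases hxa : x = a
          · subst hxa
            exact (PySem.Set.mem_update _ _ _).mpr
              (Or.inl ((PySem.Set.mem_add _ _ _).mpr (Or.inr rfl)))
          · refine (PySem.Set.mem_update _ _ _).mpr (Or.inr ?_)
            simp only [List.mem_map]
            exact ⟨x, (PySem.List.mem_dedup _ _).mpr
              (List.mem_filter.mpr ⟨hx, by simp [hxa]⟩), rfl⟩
      _ = ((s.add (spair a a)).update ((PySem.List.dedup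
            (t.filter (fun y => y != a))).map (spair a))).update
            (pairsAll (PySem.List.dedup (t.filter (fun x => x != a)))) :=
          pairs_dedup (t.filter (fun x => x != a)) _
      _ = s.update (pairsAll (PySem.List.dedup (a :: t))) := by
          rw [dedup_cons,
            show pairsAll (a :: PySem.List.dedup (t.filter (fun x => x != a)))
              = (a :: PySem.List.dedup (t.filter (fun x => x != a))).map (spair a)
                ++ pairsAll (PySem.List.dedup (t.filter (fun x => x != a))) from rfl,
            PySem.Set.update_append, List.map_cons, PySem.Set.update_cons]
  termination_by l => l.length
  decreasing_by simpa using Nat.lt_succ_of_le (List.length_filter_le _ _)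

theorem bridgeA (t : List Int) :
    ∀ (pre : List Int) (s : PySem.Set (List Int)),
      (PySem.List.enumerate t (pre.length : Int)).foldl
        (fun combs p =>
          PySem.Set.update combs
            (PySem.Set.ofList ((PySem.List.slice (pre ++ t) (some p.1) none).map
              (fun item2 => [if p.2 ≤ item2 then p.2 else item2,
                             if item2 ≥ p.2 then item2 else p.2]))))
        s = s.update (pairsAll t) := by
  induction t with
  | nil => intro pre s; rfl
  | cons a t ih =>
    intro pre s
    rw [PySem.List.enumerate_cons, List.foldl_cons]
    have hslice : PySem.List.slice (pre ++ a :: t) (some (pre.length : Int)) none = a :: t := by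
      rw [PySem.List.slice_from_natCast]
      exact List.drop_left
    have harg : ((pre.length : Int) + 1) = (((pre ++ [a]).length : Int)) := by simp
    have hpre : pre ++ a :: t = (pre ++ [a]) ++ t := by simp
    rw [hslice, harg, hpre, ih (pre ++ [a])]
    rw [update_ofList, spair_eq_A]
    rw [show pairsAll (a :: t) = (a :: t).map (spair a) ++ pairsAll t from rfl,
      PySem.Set.update_append]

-- B's peel loop builds exactly the pair list pairsAll (its conditional agrees with spair)
theorem peelLoop_eq_pairsAll : ∀ (d : List Int) (acc : List (List Int)),
    peelLoop d acc = acc ++ pairsAll d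
  | [], acc => by simp [peelLoop, pairsAll]
  | a :: rest, acc => by
    rw [show peelLoop (a :: rest) acc
        = peelLoop rest ((acc ++ [[a, a]])
            ++ rest.map (fun b => if a < b then [a, b] else [b, a])) from rfl,
      peelLoop_eq_pairsAll rest, spair_eq_B,
      show pairsAll (a :: rest) = (a :: rest).map (spair a) ++ pairsAll rest from rfl,
      List.map_cons, show spair a a = [a, a] by unfold spair; simp]
    simp

-- B's seen/vals pass computes dict.fromkeys-style dedup
theorem distinctPass_general : ∀ (t : List Int) (s : PySem.Set Int) (v : List Int),
    (t.foldl
      (fun st x =>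
        if !(PySem.Set.contains st.1 x) then (PySem.Set.add st.1 x, st.2 ++ [x]) else st)
      (s, v)).2
      = v ++ PySem.List.dedup (t.filter (fun x => !(PySem.Set.contains s x)))
  | [], _, _ => by simp
  | x :: t, s, v => by
    rw [List.foldl_cons]
    by_cases hx : PySem.Set.contains s x
    · have hmem : x ∈ s := (PySem.Set.contains_iff s x).mp hx
      rw [if_neg (by simp [hmem]), List.filter_cons_of_neg (by simp [hmem])]
      exact distinctPass_general t s v
    · have hmem : x ∉ s := fun h => hx ((PySem.Set.contains_iff s x).mpr h)
      rw [if_pos (by simp [hmem]), List.filter_cons_of_pos (by simp [hmem]), dedup_cons,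
        distinctPass_general t (s.add x) (v ++ [x])]
      have hadd : PySem.Set.add s x = s ++ [x] := PySem.Set.add_of_not_mem hmem
      have hfil : t.filter (fun y => !(PySem.Set.contains (PySem.Set.add s x) y))
          = (t.filter (fun y => !(PySem.Set.contains s y))).filter (fun y => y != x) := by
        rw [List.filter_filter]
        refine List.filter_congr (fun y _ => ?_)
        rw [hadd]
        simp only [PySem.Set.contains_eq_listContains, List.contains_append]
        cases h1 : s.contains y <;> cases h2 : (y == x) <;> simp_all
      rw [hfil, List.append_assoc]
      rfl

theorem distinctPass_snd (l : List Int) : (distinctPass l).2 = PySem.List.dedup l := by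
  unfold distinctPass
  rw [distinctPass_general l PySem.Set.empty []]
  simp [PySem.Set.empty]

-- ===== VERDICT (by name: the statement is the Claim_ definition above) =====
theorem makeSortedPairs_spec : Claim_equal_makeSortedPairs := by
  intro l _
  unfold Spec_makeSortedPairs
  have hA := bridgeA l [] PySem.Set.empty
  simp only [List.nil_append, List.length_nil, Nat.cast_zero] at hA
  unfold makeSortedPairs_alt
  rw [distinctPass_snd, peelLoop_eq_pairsAll]
  rw [List.nil_append]
  show makeSortedPairs l = _
  unfold makeSortedPairs
  rw [hA, pairs_dedup]
  exact PySem.Set.update_nil_left _
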